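-- pv_equiv track=rewrite | github.com/xiaofan88/sschallu | code/take_data.py | extract_bash_packages
-- ===== SOURCE A (Python) =====
-- from typing import List, Dict, Optional, Tuple
--
-- def extract_bash_packages(code: str) -> List[str]:
--     lines = code.splitlines()
--
--     result = {
--         'pip': set(),
--         'npm': set(),
--         'composer': set(),
--         'gem': set(),
--         'cpan': set()
--     }
--
--     for line in lines:
--         line = line.strip().split('#')[0]
--
--         if line.startswith("pip install") or line.startswith("pip3 install"):
--             parts = line.split()
--             pkgs = [p for p in parts[2:] if not p.startswith("-")]
--             result["pip"].update(pkgs)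
--
--         # npm install or yarn add
--         elif line.startswith("npm install") or line.startswith("yarn add") or line.startswith("npx expo install"):
--             parts = line.split()
--             pkgs = [p for p in parts[2:] if not p.startswith("-")]
--             result["npm"].update(pkgs)
--
--         # composer require
--         elif line.startswith("composer require"):
--             parts = line.split()
--             pkgs = [p for p in parts[2:] if not p.startswith("-")]
--             result["composer"].update(pkgs)
--
--         # gem install
--         elif line.startswith("gem install"):
--             parts = line.split()
--             pkgs = [p for p in parts[2:] if not p.startswith("-")]
--             result["gem"].update(pkgs)
--
--         # cpan install
--         elif line.startswith("cpan install") or line.startswith("cpanm install") or line.startswith("cpanm ") or line.startswith("cpan "):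
--             parts = line.split()
--             pkgs = [p for p in parts[2:] if not p.startswith("-")]
--             result["cpan"].update(pkgs)
--
--     return result
-- ===== SOURCE B (Python) =====
-- def extract_bash_packages(code):
--     # One pass per package manager over the pre-cleaned lines; the five prefix
--     # groups are mutually exclusive, so this matches the first-match ladder of A.
--     cleaned = [l.strip().split('#')[0] for l in code.splitlines()]
--
--     def collect(prefixes):
--         s = set()
--         for line in cleaned:
--             if line.startswith(prefixes):
--                 s.update(p for p in line.split()[2:] if not p.startswith('-'))
--         return s
--
--     return {
--         'pip': collect(('pip install', 'pip3 install')),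
--         'npm': collect(('npm install', 'yarn add', 'npx expo install')),
--         'composer': collect(('composer require',)),
--         'gem': collect(('gem install',)),
--         'cpan': collect(('cpan install', 'cpanm install', 'cpanm ', 'cpan ')),
--     }
-- ===== Notes on version B (the rewrite author's own statement) =====
-- stated objective: alternative
-- what changed: Replaced the per-line five-branch elif ladder mutating a dict with five independent per-category scans over the pre-cleaned lines (one collect pass per package manager), justified by a proof that the five prefix groups are mutually exclusive so first-match dispatch equals per-group matching.
import Mathlib
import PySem

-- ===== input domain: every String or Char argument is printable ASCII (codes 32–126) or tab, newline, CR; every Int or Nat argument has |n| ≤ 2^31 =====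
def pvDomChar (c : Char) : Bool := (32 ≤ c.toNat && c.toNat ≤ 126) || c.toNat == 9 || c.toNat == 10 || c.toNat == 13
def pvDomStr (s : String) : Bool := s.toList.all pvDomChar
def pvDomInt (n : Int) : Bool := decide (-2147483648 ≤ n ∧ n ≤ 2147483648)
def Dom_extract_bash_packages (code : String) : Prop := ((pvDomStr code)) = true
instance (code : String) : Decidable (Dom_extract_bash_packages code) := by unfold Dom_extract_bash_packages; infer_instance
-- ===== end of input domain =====

-- B replaces A's per-line first-match elif ladder over a mutable dict by five independent
-- per-category collection passes (equal because the prefix groups are mutually exclusive).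

-- ===== PORT A =====
-- line.strip().split('#')[0]
def pvCleanA (raw : String) : String :=
  PySem.List.pyGetD ((PySem.Str.split? (PySem.Str.strip raw) "#").getD []) 0 ""

-- parts = line.split(); [p for p in parts[2:] if not p.startswith("-")]
def pvPkgsA (line : String) : List String :=
  (PySem.List.slice (PySem.Str.split₀ line) (some 2) none).filter
    (fun p => !(PySem.Str.startswith p "-"))

def pvStepA (result : PySem.Dict String (PySem.Set String)) (raw : String) :
    PySem.Dict String (PySem.Set String) :=
  let line := pvCleanA raw
  if PySem.Str.startswith line "pip install" || PySem.Str.startswith line "pip3 install" then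
    result.modify "pip" [] (fun s => PySem.Set.update s (pvPkgsA line))
  else if PySem.Str.startswith line "npm install" || PySem.Str.startswith line "yarn add" ||
      PySem.Str.startswith line "npx expo install" then
    result.modify "npm" [] (fun s => PySem.Set.update s (pvPkgsA line))
  else if PySem.Str.startswith line "composer require" then
    result.modify "composer" [] (fun s => PySem.Set.update s (pvPkgsA line))
  else if PySem.Str.startswith line "gem install" then
    result.modify "gem" [] (fun s => PySem.Set.update s (pvPkgsA line))
  else if PySem.Str.startswith line "cpan install" || PySem.Str.startswith line "cpanm install" ||
      PySem.Str.startswith line "cpanm " || PySem.Str.startswith line "cpan " then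
    result.modify "cpan" [] (fun s => PySem.Set.update s (pvPkgsA line))
  else result

def extract_bash_packages (code : String) : List (String × List String) :=
  ((PySem.Str.splitlines code).foldl pvStepA
    (PySem.Dict.ofList
      [("pip", PySem.Set.empty), ("npm", PySem.Set.empty), ("composer", PySem.Set.empty),
       ("gem", PySem.Set.empty), ("cpan", PySem.Set.empty)])).items

-- ===== PORT B =====
def pvCleanB (raw : String) : String :=
  PySem.List.pyGetD ((PySem.Str.split? (PySem.Str.strip raw) "#").getD []) 0 ""

def pvPkgsB (line : String) : List String :=
  (PySem.List.slice (PySem.Str.split₀ line) (some 2) none).filter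
    (fun p => !(PySem.Str.startswith p "-"))

def pvCollectB (cleaned : List String) (prefixes : List String) : PySem.Set String :=
  cleaned.foldl
    (fun s line =>
      if prefixes.any (fun p => PySem.Str.startswith line p) then
        PySem.Set.update s (pvPkgsB line)
      else s)
    PySem.Set.empty

def extract_bash_packages_alt (code : String) : List (String × List String) :=
  let cleaned := (PySem.Str.splitlines code).map pvCleanB
  [("pip", pvCollectB cleaned ["pip install", "pip3 install"]),
   ("npm", pvCollectB cleaned ["npm install", "yarn add", "npx expo install"]),
   ("composer", pvCollectB cleaned ["composer require"]),
   ("gem", pvCollectB cleaned ["gem install"]),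
   ("cpan", pvCollectB cleaned ["cpan install", "cpanm install", "cpanm ", "cpan "])]

-- ===== PRECONDITION & SPEC =====
def Spec_extract_bash_packages (code : String) (out : List (String × List String)) : Prop := out = extract_bash_packages_alt code
instance (code : String) (out : List (String × List String)) : Decidable (Spec_extract_bash_packages code out) := by unfold Spec_extract_bash_packages; infer_instance

-- ===== CLAIM (what is proved, stated in full; the proofs are below) =====
def Claim_equal_extract_bash_packages : Prop := ∀ (code : String), Dom_extract_bash_packages code → Spec_extract_bash_packages code (extract_bash_packages code)

-- ===== LEMMAS AND PROOFS =====

-- generalized-accumulator form of pvCollectB's fold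
def pvColl (prefixes : List String) (init : PySem.Set String) (cleaned : List String) : PySem.Set String :=
  cleaned.foldl
    (fun s line =>
      if prefixes.any (fun p => PySem.Str.startswith line p) then
        PySem.Set.update s (pvPkgsB line)
      else s)
    init

-- a string cannot start with two prefixes neither of which is a prefix of the other
lemma pvExcl (line : String) (g1 g2 : List String)
    (hinc : ∀ p ∈ g1, ∀ q ∈ g2, ¬ p.toList <+: q.toList ∧ ¬ q.toList <+: p.toList)
    (h : g1.any (fun p => PySem.Str.startswith line p) = true) :
    g2.any (fun q => PySem.Str.startswith line q) = false := by
  rcases List.any_eq_true.mp h with ⟨p, hp, hsp⟩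
  refine List.any_eq_false.mpr ?_
  intro q hq
  by_contra hsq
  have hp' : p.toList <+: line.toList := (PySem.Chars.startswith_iff line.toList p.toList).mp (by simpa using hsp)
  have hq' : q.toList <+: line.toList := (PySem.Chars.startswith_iff line.toList q.toList).mp (by simpa using hsq)
  rcases List.prefix_or_prefix_of_prefix hp' hq' with hpq | hqp
  · exact (hinc p hp q hq).1 hpq
  · exact (hinc p hp q hq).2 hqp

def pvG1 : List String := ["pip install", "pip3 install"]
def pvG2 : List String := ["npm install", "yarn add", "npx expo install"]
def pvG3 : List String := ["composer require"]
def pvG4 : List String := ["gem install"]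
def pvG5 : List String := ["cpan install", "cpanm install", "cpanm ", "cpan "]

def pvMk (a b c d e : PySem.Set String) : PySem.Dict String (PySem.Set String) :=
  PySem.Dict.ofList [("pip", a), ("npm", b), ("composer", c), ("gem", d), ("cpan", e)]


lemma pvCleanBA : pvCleanB = pvCleanA := rfl

lemma pvColl_cons_pos (g : List String) (x : PySem.Set String) (line : String)
    (rest : List String) (h : g.any (fun p => PySem.Str.startswith line p) = true) :
    pvColl g x (line :: rest) = pvColl g (PySem.Set.update x (pvPkgsA line)) rest := by
  simp only [pvColl, List.foldl_cons, h, if_true]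
  rfl

lemma pvColl_cons_neg (g : List String) (x : PySem.Set String) (line : String)
    (rest : List String) (h : g.any (fun p => PySem.Str.startswith line p) = false) :
    pvColl g x (line :: rest) = pvColl g x rest := by
  simp only [pvColl, List.foldl_cons, h]
  rfl

lemma pvModPip (a b c d e : PySem.Set String) (f : PySem.Set String → PySem.Set String) :
    (pvMk a b c d e).modify "pip" [] f = pvMk (f a) b c d e := rfl
lemma pvModNpm (a b c d e : PySem.Set String) (f : PySem.Set String → PySem.Set String) :
    (pvMk a b c d e).modify "npm" [] f = pvMk a (f b) c d e := rfl
lemma pvModComposer (a b c d e : PySem.Set String) (f : PySem.Set String → PySem.Set String) :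
    (pvMk a b c d e).modify "composer" [] f = pvMk a b (f c) d e := rfl
lemma pvModGem (a b c d e : PySem.Set String) (f : PySem.Set String → PySem.Set String) :
    (pvMk a b c d e).modify "gem" [] f = pvMk a b c (f d) e := rfl
lemma pvModCpan (a b c d e : PySem.Set String) (f : PySem.Set String → PySem.Set String) :
    (pvMk a b c d e).modify "cpan" [] f = pvMk a b c d (f e) := rfl

lemma pvLoop (L : List String) (a b c d e : PySem.Set String) :
    L.foldl pvStepA (pvMk a b c d e) =
      pvMk (pvColl pvG1 a (L.map pvCleanB)) (pvColl pvG2 b (L.map pvCleanB))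
           (pvColl pvG3 c (L.map pvCleanB)) (pvColl pvG4 d (L.map pvCleanB))
           (pvColl pvG5 e (L.map pvCleanB)) := by
  induction L generalizing a b c d e with
  | nil => rfl
  | cons raw L ih =>
    simp only [List.foldl_cons, List.map_cons, pvCleanBA]
    set line := pvCleanA raw with hline
    by_cases h1 : (PySem.Str.startswith line "pip install" ||
        PySem.Str.startswith line "pip3 install") = true
    · have hA1 : pvG1.any (fun p => PySem.Str.startswith line p) = true := by
        simpa [pvG1] using h1
      rw [show pvStepA (pvMk a b c d e) raw =
            pvMk (PySem.Set.update a (pvPkgsA line)) b c d e from by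
          simp only [pvStepA, ← hline]; rw [if_pos h1]; exact pvModPip a b c d e _]
      rw [ih, pvColl_cons_pos _ _ _ _ hA1,
        pvColl_cons_neg _ _ _ _ (pvExcl line pvG1 pvG2 (by decide) hA1),
        pvColl_cons_neg _ _ _ _ (pvExcl line pvG1 pvG3 (by decide) hA1),
        pvColl_cons_neg _ _ _ _ (pvExcl line pvG1 pvG4 (by decide) hA1),
        pvColl_cons_neg _ _ _ _ (pvExcl line pvG1 pvG5 (by decide) hA1)]
      simp only [pvCleanBA]
    · by_cases h2 : (PySem.Str.startswith line "npm install" ||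
          PySem.Str.startswith line "yarn add" ||
          PySem.Str.startswith line "npx expo install") = true
      · have hA2 : pvG2.any (fun p => PySem.Str.startswith line p) = true := by
          simpa [pvG2, Bool.or_assoc] using h2
        rw [show pvStepA (pvMk a b c d e) raw =
              pvMk a (PySem.Set.update b (pvPkgsA line)) c d e from by
            simp only [pvStepA, ← hline]; rw [if_neg h1, if_pos h2]; exact pvModNpm a b c d e _]
        rw [ih, pvColl_cons_pos _ _ _ _ hA2,
          pvColl_cons_neg _ _ _ _ (pvExcl line pvG2 pvG1 (by decide) hA2),
          pvColl_cons_neg _ _ _ _ (pvExcl line pvG2 pvG3 (by decide) hA2),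
          pvColl_cons_neg _ _ _ _ (pvExcl line pvG2 pvG4 (by decide) hA2),
          pvColl_cons_neg _ _ _ _ (pvExcl line pvG2 pvG5 (by decide) hA2)]
        simp only [pvCleanBA]
      · by_cases h3 : PySem.Str.startswith line "composer require" = true
        · have hA3 : pvG3.any (fun p => PySem.Str.startswith line p) = true := by
            simpa [pvG3] using h3
          rw [show pvStepA (pvMk a b c d e) raw =
                pvMk a b (PySem.Set.update c (pvPkgsA line)) d e from by
              simp only [pvStepA, ← hline]; rw [if_neg h1, if_neg h2, if_pos h3]; exact pvModComposer a b c d e _]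
          rw [ih, pvColl_cons_pos _ _ _ _ hA3,
            pvColl_cons_neg _ _ _ _ (pvExcl line pvG3 pvG1 (by decide) hA3),
            pvColl_cons_neg _ _ _ _ (pvExcl line pvG3 pvG2 (by decide) hA3),
            pvColl_cons_neg _ _ _ _ (pvExcl line pvG3 pvG4 (by decide) hA3),
            pvColl_cons_neg _ _ _ _ (pvExcl line pvG3 pvG5 (by decide) hA3)]
          simp only [pvCleanBA]
        · by_cases h4 : PySem.Str.startswith line "gem install" = true
          · have hA4 : pvG4.any (fun p => PySem.Str.startswith line p) = true := by
              simpa [pvG4] using h4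
            rw [show pvStepA (pvMk a b c d e) raw =
                  pvMk a b c (PySem.Set.update d (pvPkgsA line)) e from by
                simp only [pvStepA, ← hline]
                rw [if_neg h1, if_neg h2, if_neg h3, if_pos h4]; exact pvModGem a b c d e _]
            rw [ih, pvColl_cons_pos _ _ _ _ hA4,
              pvColl_cons_neg _ _ _ _ (pvExcl line pvG4 pvG1 (by decide) hA4),
              pvColl_cons_neg _ _ _ _ (pvExcl line pvG4 pvG2 (by decide) hA4),
              pvColl_cons_neg _ _ _ _ (pvExcl line pvG4 pvG3 (by decide) hA4),
              pvColl_cons_neg _ _ _ _ (pvExcl line pvG4 pvG5 (by decide) hA4)]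
            simp only [pvCleanBA]
          · by_cases h5 : (PySem.Str.startswith line "cpan install" ||
                PySem.Str.startswith line "cpanm install" ||
                PySem.Str.startswith line "cpanm " ||
                PySem.Str.startswith line "cpan ") = true
            · have hA5 : pvG5.any (fun p => PySem.Str.startswith line p) = true := by
                simpa [pvG5, Bool.or_assoc] using h5
              rw [show pvStepA (pvMk a b c d e) raw =
                    pvMk a b c d (PySem.Set.update e (pvPkgsA line)) from by
                  simp only [pvStepA, ← hline]
                  rw [if_neg h1, if_neg h2, if_neg h3, if_neg h4, if_pos h5]; exact pvModCpan a b c d e _]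
              rw [ih, pvColl_cons_pos _ _ _ _ hA5,
                pvColl_cons_neg _ _ _ _ (pvExcl line pvG5 pvG1 (by decide) hA5),
                pvColl_cons_neg _ _ _ _ (pvExcl line pvG5 pvG2 (by decide) hA5),
                pvColl_cons_neg _ _ _ _ (pvExcl line pvG5 pvG3 (by decide) hA5),
                pvColl_cons_neg _ _ _ _ (pvExcl line pvG5 pvG4 (by decide) hA5)]
              simp only [pvCleanBA]
            · have hB : ∀ g ∈ [pvG1, pvG2, pvG3, pvG4, pvG5],
                  g.any (fun p => PySem.Str.startswith line p) = false := by
                simp only [pvG1, pvG2, pvG3, pvG4, pvG5, List.mem_cons, List.not_mem_nil,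
                  or_false]
                rintro g (rfl | rfl | rfl | rfl | rfl) <;>
                  simp_all [List.any_cons, List.any_nil, Bool.or_assoc]
              rw [show pvStepA (pvMk a b c d e) raw = pvMk a b c d e from by
                  simp only [pvStepA, ← hline]
                  rw [if_neg h1, if_neg h2, if_neg h3, if_neg h4, if_neg h5]]
              rw [ih,
                pvColl_cons_neg _ _ _ _ (hB pvG1 (by simp)),
                pvColl_cons_neg _ _ _ _ (hB pvG2 (by simp)),
                pvColl_cons_neg _ _ _ _ (hB pvG3 (by simp)),
                pvColl_cons_neg _ _ _ _ (hB pvG4 (by simp)),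
                pvColl_cons_neg _ _ _ _ (hB pvG5 (by simp))]
              simp only [pvCleanBA]

theorem extract_bash_packages_spec : Claim_equal_extract_bash_packages := by
  intro code _
  unfold Spec_extract_bash_packages extract_bash_packages extract_bash_packages_alt
  rw [show (PySem.Dict.ofList
      [("pip", PySem.Set.empty), ("npm", PySem.Set.empty), ("composer", PySem.Set.empty),
       ("gem", PySem.Set.empty), ("cpan", PySem.Set.empty)]) =
      pvMk PySem.Set.empty PySem.Set.empty PySem.Set.empty PySem.Set.empty PySem.Set.empty from rfl]
  rw [pvLoop]
  rfl
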